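-- pv_equiv track=rewrite | github.com/Atanu19Nath/DSA--Problems | Binary search/Bitonic Point.py | findBiotonic_point
-- ===== SOURCE A (Python) =====
-- def findBiotonic_point(arr):
--
--     start = 0
--
--     end = len(arr) -1
--
--     n = len(arr)
--
--     while start<=end:
--
--         mid = start + ( end - start )//2
--
--         next = ( mid + 1) % n
--
--         pre = ( mid + n - 1) % n
--
--         if arr[pre] < arr[mid] > arr[next]:
--
--             return arr[mid]
--
--         elif arr[mid] < arr[next]:
--
--             start = mid + 1
--
--         else:
--
--             end = mid - 1
-- ===== SOURCE B (Python) =====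
-- def findBiotonic_point(arr):
--     n = len(arr)
--     for i in range(n):
--         if arr[i - 1] < arr[i] > arr[(i + 1) % n]:
--             return arr[i]
--     return None
-- ===== Notes on version B (the rewrite author's own statement) =====
-- stated objective: simpler
-- what changed: B replaces the wraparound binary search by a single left-to-right scan that returns the first element strictly greater than both its cyclic neighbours; on the domain stated by Pre_ (strictly bitonic arrays and their degenerate variants - valley arrays with the valley in the left half and last > first, and non-increasing arrays with strict first and wraparound steps - all of length >= 2) the cyclic peak is unique and reached by A, so B equals A there; …
-- outside the precondition, e.g. on findBiotonic_point([6, 1, 4, 0, 2]): A returns 4, B returns 6; on findBiotonic_point([1, 3, 2, 4]): A returns 3, B returns 3; on findBiotonic_point([2, -2, 0]): A returns None, B returns 2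
import Mathlib
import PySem

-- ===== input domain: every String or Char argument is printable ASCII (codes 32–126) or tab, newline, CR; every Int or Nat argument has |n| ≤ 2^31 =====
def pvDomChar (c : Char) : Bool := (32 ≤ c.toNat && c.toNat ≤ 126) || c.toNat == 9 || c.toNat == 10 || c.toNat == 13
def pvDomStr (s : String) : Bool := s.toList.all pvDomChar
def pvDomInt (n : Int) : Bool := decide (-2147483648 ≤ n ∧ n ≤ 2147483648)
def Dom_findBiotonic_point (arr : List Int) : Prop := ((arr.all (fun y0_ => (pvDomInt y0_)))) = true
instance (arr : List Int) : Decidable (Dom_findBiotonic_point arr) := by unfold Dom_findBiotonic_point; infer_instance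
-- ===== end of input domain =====

-- B replaces A's wraparound binary search by a single linear scan returning the first element
-- strictly greater than both its cyclic neighbours; on the natural domain stated by Pre_
-- (strictly bitonic arrays of length ≥ 2) both return the unique bitonic point.

-- ===== PORT A =====
-- literal port of A's while loop; `0` in the else branch stands for Python's None (not an int,
-- excluded by Pre_); pyGetD's default is never taken: under Pre_ all probed indices lie in [0, n).
def findBiotonicLoop (arr : List Int) (n : Int) (start stop : Int) : Int :=
  if h : start ≤ stop then
    let mid := start + PySem.Int.floordiv (stop - start) 2
    let nxt := PySem.Int.mod (mid + 1) n
    let pre := PySem.Int.mod (mid + n - 1) n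
    if PySem.List.pyGetD arr pre 0 < PySem.List.pyGetD arr mid 0 ∧
       PySem.List.pyGetD arr mid 0 > PySem.List.pyGetD arr nxt 0 then
      PySem.List.pyGetD arr mid 0
    else if PySem.List.pyGetD arr mid 0 < PySem.List.pyGetD arr nxt 0 then
      findBiotonicLoop arr n (mid + 1) stop
    else
      findBiotonicLoop arr n start (mid - 1)
  else 0
termination_by (stop - start + 1).toNat
decreasing_by
  · simp only [PySem.Int.floordiv_eq_ediv_of_pos (by norm_num : (0:Int) < 2)]
    omega
  · simp only [PySem.Int.floordiv_eq_ediv_of_pos (by norm_num : (0:Int) < 2)]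
    omega

def findBiotonic_point (arr : List Int) : Int :=
  findBiotonicLoop arr (PySem.List.len arr) 0 (PySem.List.len arr - 1)

-- ===== PORT B =====
-- port of Source B's `for i in range(n)` scan with early return; arr[i-1] is Python indexing
-- (negative only at i = 0, where it reads the last element); `0` again stands for None.
def scanPeakLoop (arr : List Int) (n i : Int) : Int :=
  if h : i < n then
    if PySem.List.pyGetD arr (i - 1) 0 < PySem.List.pyGetD arr i 0 ∧
       PySem.List.pyGetD arr i 0 > PySem.List.pyGetD arr (PySem.Int.mod (i + 1) n) 0 then
      PySem.List.pyGetD arr i 0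
    else scanPeakLoop arr n (i + 1)
  else 0
termination_by (n - i).toNat

def findBiotonic_point_alt (arr : List Int) : Int :=
  scanPeakLoop arr (PySem.List.len arr) 0

-- ===== PRECONDITION & SPEC =====
-- Pre_ restricts to the domain where a unique cyclic peak is well defined and A's search reaches
-- it: strictly bitonic arrays of length ≥ 2 (strictly increasing to a peak, then strictly
-- decreasing; either side may be empty), valley (rotated-ascending) arrays whose valley lies in
-- the left half and whose last element exceeds the first (the peak wraps to the last index), and
-- non-increasing arrays with strict first and wraparound steps (the peak is the first element).
-- Outside these there is no well-defined bitonic point and A's behaviour is accidental: A may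
-- fall through and return None (not an int), or return whichever wraparound local peak its probe
-- order happens to hit, while B returns the first local peak in scan order — both defensible.
def Pre_findBiotonic_point (arr : List Int) : Prop :=
  2 ≤ arr.length ∧
  ((∃ k, k < arr.length ∧
      (∀ i, i < k → arr.getD i 0 < arr.getD (i + 1) 0) ∧
      (∀ i, i < arr.length - 1 → k ≤ i → arr.getD (i + 1) 0 < arr.getD i 0)) ∨
   (∃ k, k < arr.length ∧ 2 * k ≤ arr.length - 1 ∧
      (∀ i, i < k → arr.getD (i + 1) 0 < arr.getD i 0) ∧
      (∀ i, i < arr.length - 1 → k ≤ i → arr.getD i 0 < arr.getD (i + 1) 0) ∧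
      arr.getD 0 0 < arr.getD (arr.length - 1) 0) ∨
   ((∀ i, i < arr.length - 1 → arr.getD (i + 1) 0 ≤ arr.getD i 0) ∧
      arr.getD 1 0 < arr.getD 0 0 ∧ arr.getD (arr.length - 1) 0 < arr.getD 0 0))
instance (arr : List Int) : Decidable (Pre_findBiotonic_point arr) := by
  unfold Pre_findBiotonic_point; infer_instance

def pvWitness_findBiotonic_point : List Int := [0, 5, 3]

def Spec_findBiotonic_point (arr : List Int) (out : Int) : Prop := out = findBiotonic_point_alt arr
instance (arr : List Int) (out : Int) : Decidable (Spec_findBiotonic_point arr out) := by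
  unfold Spec_findBiotonic_point; infer_instance

-- ===== CLAIM (what is proved, stated in full; the proofs are below) =====
def Claim_equal_findBiotonic_point : Prop := ∀ (arr : List Int), Dom_findBiotonic_point arr → Pre_findBiotonic_point arr → Spec_findBiotonic_point arr (findBiotonic_point arr)

-- ===== LEMMAS AND PROOFS =====

lemma getD_lt_chain_inc (arr : List Int) (lo hi : Nat)
    (h : ∀ i, lo ≤ i → i < hi → arr.getD i 0 < arr.getD (i + 1) 0) :
    ∀ i j : Nat, lo ≤ i → i < j → j ≤ hi → arr.getD i 0 < arr.getD j 0 := by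
  intro i j
  induction j with
  | zero => omega
  | succ j ih =>
    intro hlo hij hjk
    rcases Nat.lt_or_ge i j with hc | hc
    · exact lt_trans (ih hlo hc (by omega)) (h j (by omega) (by omega))
    · have : i = j := by omega
      subst this
      exact h i (by omega) (by omega)

lemma getD_lt_chain_dec (arr : List Int) (lo hi : Nat)
    (h : ∀ i, lo ≤ i → i < hi → arr.getD (i + 1) 0 < arr.getD i 0) :
    ∀ i j : Nat, lo ≤ i → i < j → j ≤ hi → arr.getD j 0 < arr.getD i 0 := by
  intro i j
  induction j with
  | zero => omega
  | succ j ih =>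
    intro hlo hij hjk
    rcases Nat.lt_or_ge i j with hc | hc
    · exact lt_trans (h j (by omega) (by omega)) (ih hlo hc (by omega))
    · have : i = j := by omega
      subst this
      exact h i (by omega) (by omega)

-- the binary-search loop of A returns the peak value whenever the peak index lies in [start, stop]
lemma findBiotonicLoop_eq_peak (arr : List Int) (k : Nat) (hk : k < arr.length)
    (h2 : 2 ≤ arr.length)
    (hinc : ∀ i, i < k → arr.getD i 0 < arr.getD (i + 1) 0)
    (hdec : ∀ i, i < arr.length - 1 → k ≤ i → arr.getD (i + 1) 0 < arr.getD i 0)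
    (start stop : Int) (h0 : 0 ≤ start) (hstop : stop ≤ (arr.length : Int) - 1)
    (hsk : start ≤ (k : Int)) (hks : (k : Int) ≤ stop) :
    findBiotonicLoop arr (arr.length : Int) start stop = arr.getD k 0 := by
  have hnpos : (0:Int) < (arr.length : Int) := by omega
  have hss : start ≤ stop := le_trans hsk hks
  rw [findBiotonicLoop]
  simp only [dif_pos hss]
  rw [PySem.Int.floordiv_eq_ediv_of_pos (by norm_num : (0:Int) < 2)]
  set m : Int := start + (stop - start) / 2 with hm
  have hstartm : start ≤ m := by omega
  have hmstop : m ≤ stop := by omega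
  have hm0 : 0 ≤ m := le_trans h0 hstartm
  set km : Nat := m.toNat with hkmdef
  have hmk : (km : Int) = m := Int.toNat_of_nonneg hm0
  have hkmlen : km < arr.length := by omega
  rcases Nat.lt_trichotomy km k with hc | hc | hc
  · -- km < k : the array still rises at mid, search the right half
    have hnxt : PySem.Int.mod (m + 1) (arr.length : Int) = ((km + 1 : Nat) : Int) := by
      rw [PySem.Int.mod_eq_emod_of_pos hnpos, Int.emod_eq_of_lt (by omega) (by omega)]
      push_cast; omega
    rw [hnxt, ← hmk]
    simp only [PySem.List.pyGetD_natCast]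
    have hlt : arr.getD km 0 < arr.getD (km + 1) 0 := hinc km hc
    rw [if_neg (by intro hcond; omega), if_pos hlt]
    exact findBiotonicLoop_eq_peak arr k hk h2 hinc hdec ((km : Int) + 1) stop (by omega)
      hstop (by omega) hks
  · -- km = k : mid is the peak
    subst hc
    have hpre : arr.getD (if km = 0 then arr.length - 1 else km - 1) 0 < arr.getD km 0 := by
      by_cases hk0 : km = 0
      · rw [if_pos hk0]
        exact getD_lt_chain_dec arr km (arr.length - 1)
          (fun i hki hiL => hdec i hiL hki) km (arr.length - 1) le_rfl (by omega) (by omega)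
      · rw [if_neg hk0]
        have := hinc (km - 1) (by omega)
        rwa [Nat.sub_add_cancel (by omega)] at this
    have hprei : PySem.Int.mod (m + (arr.length : Int) - 1) (arr.length : Int)
        = (((if km = 0 then arr.length - 1 else km - 1) : Nat) : Int) := by
      by_cases hk0 : km = 0
      · rw [if_pos hk0]
        have hmz : m = 0 := by omega
        rw [hmz, PySem.Int.mod_eq_emod_of_pos hnpos,
          Int.emod_eq_of_lt (by omega) (by omega)]
        omega
      · rw [if_neg hk0, PySem.Int.mod_eq_emod_of_pos hnpos,
          show m + (arr.length : Int) - 1 = (m - 1) + (arr.length : Int) by ring,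
          Int.add_emod_right, Int.emod_eq_of_lt (by omega) (by omega)]
        omega
    have hnxtg : arr.getD km 0 > arr.getD (if km = arr.length - 1 then 0 else km + 1) 0 := by
      by_cases hkL : km = arr.length - 1
      · rw [if_pos hkL]
        exact getD_lt_chain_inc arr 0 km (fun i _ hik => hinc i hik) 0 km (by omega) (by omega) le_rfl
      · rw [if_neg hkL]
        exact hdec km (by omega) le_rfl
    have hnxti : PySem.Int.mod (m + 1) (arr.length : Int)
        = (((if km = arr.length - 1 then 0 else km + 1) : Nat) : Int) := by
      by_cases hkL : km = arr.length - 1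
      · rw [if_pos hkL, show m + 1 = (arr.length : Int) by omega,
          PySem.Int.mod_eq_emod_of_pos hnpos, Int.emod_self]
        exact Nat.cast_zero.symm
      · rw [if_neg hkL, PySem.Int.mod_eq_emod_of_pos hnpos,
          Int.emod_eq_of_lt (by omega) (by omega)]
        push_cast; omega
    rw [hprei, hnxti, ← hmk]
    simp only [PySem.List.pyGetD_natCast]
    rw [if_pos ⟨hpre, hnxtg⟩]
  · -- k < km : the array already falls at mid, search the left half
    have hmltstop : m < stop := by omega
    have hprei : PySem.Int.mod (m + (arr.length : Int) - 1) (arr.length : Int)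
        = ((km - 1 : Nat) : Int) := by
      rw [PySem.Int.mod_eq_emod_of_pos hnpos,
        show m + (arr.length : Int) - 1 = (m - 1) + (arr.length : Int) by ring,
        Int.add_emod_right, Int.emod_eq_of_lt (by omega) (by omega)]
      omega
    have hnxti : PySem.Int.mod (m + 1) (arr.length : Int) = ((km + 1 : Nat) : Int) := by
      rw [PySem.Int.mod_eq_emod_of_pos hnpos, Int.emod_eq_of_lt (by omega) (by omega)]
      push_cast; omega
    have hpre_gt : arr.getD km 0 < arr.getD (km - 1) 0 := by
      have := hdec (km - 1) (by omega) (by omega)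
      rwa [Nat.sub_add_cancel (by omega)] at this
    have hnxt_lt : arr.getD (km + 1) 0 < arr.getD km 0 := hdec km (by omega) (by omega)
    rw [hprei, hnxti, ← hmk]
    simp only [PySem.List.pyGetD_natCast]
    rw [if_neg (by intro hcond; omega), if_neg (by omega)]
    exact findBiotonicLoop_eq_peak arr k hk h2 hinc hdec start ((km : Int) - 1) h0
      (by omega) hsk (by omega)
termination_by (stop - start + 1).toNat
decreasing_by
  · omega
  · omega

-- B's scan, started at any index j ≤ k, runs to the peak index k and returns the peak value
lemma scanPeakLoop_eq_peak (arr : List Int) (k : Nat) (hk : k < arr.length)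
    (h2 : 2 ≤ arr.length)
    (hinc : ∀ i, i < k → arr.getD i 0 < arr.getD (i + 1) 0)
    (hdec : ∀ i, i < arr.length - 1 → k ≤ i → arr.getD (i + 1) 0 < arr.getD i 0)
    (j : Nat) (hj : j ≤ k) :
    scanPeakLoop arr (arr.length : Int) (j : Int) = arr.getD k 0 := by
  have hnpos : (0:Int) < (arr.length : Int) := by omega
  have hne : arr ≠ [] := by intro h; rw [h] at h2; simp at h2
  rw [scanPeakLoop]
  simp only [dif_pos (by omega : (j : Int) < (arr.length : Int))]
  rcases Nat.lt_or_ge j k with hc | hc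
  · -- j < k : the scan's peak test fails (the array still rises), move right
    have hnxti : PySem.Int.mod ((j : Int) + 1) (arr.length : Int) = ((j + 1 : Nat) : Int) := by
      rw [PySem.Int.mod_eq_emod_of_pos hnpos, Int.emod_eq_of_lt (by omega) (by omega)]
      push_cast; omega
    have hrise : arr.getD j 0 < arr.getD (j + 1) 0 := hinc j hc
    rw [hnxti]
    rw [show ((j : Int)) = ((j : Nat) : Int) from rfl]
    simp only [PySem.List.pyGetD_natCast]
    rw [if_neg (by intro hcond; omega)]
    rw [show ((j : Nat) : Int) + 1 = ((j + 1 : Nat) : Int) by push_cast; omega]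
    exact scanPeakLoop_eq_peak arr k hk h2 hinc hdec (j + 1) (by omega)
  · -- j = k : the peak test fires
    have hjk : j = k := by omega
    subst hjk
    have hpre : PySem.List.pyGetD arr ((j : Int) - 1) 0 < arr.getD j 0 := by
      rcases Nat.eq_zero_or_pos j with h0 | h0
      · subst h0
        rw [show ((0 : Nat) : Int) - 1 = (-1 : Int) by omega,
          PySem.List.pyGetD_neg_one arr 0 hne, List.getLast_eq_getElem]
        have := getD_lt_chain_dec arr 0 (arr.length - 1)
          (fun i h0i hiL => hdec i hiL h0i) 0 (arr.length - 1) le_rfl (by omega) le_rfl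
        rwa [List.getD_eq_getElem arr 0 (by omega : arr.length - 1 < arr.length)] at this
      · rw [show (j : Int) - 1 = ((j - 1 : Nat) : Int) by omega,
          PySem.List.pyGetD_natCast]
        have := hinc (j - 1) (by omega)
        rwa [Nat.sub_add_cancel (by omega)] at this
    have hnxt : arr.getD j 0 >
        PySem.List.pyGetD arr (PySem.Int.mod ((j : Int) + 1) (arr.length : Int)) 0 := by
      by_cases hL : j = arr.length - 1
      · rw [show (j : Int) + 1 = (arr.length : Int) by omega,
          PySem.Int.mod_eq_emod_of_pos hnpos, Int.emod_self,
          show (0 : Int) = ((0 : Nat) : Int) from rfl, PySem.List.pyGetD_natCast]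
        exact getD_lt_chain_inc arr 0 j (fun i _ hik => hinc i hik) 0 j (by omega)
          (by omega) le_rfl
      · rw [show (j : Int) + 1 = ((j + 1 : Nat) : Int) by omega,
          show PySem.Int.mod ((j + 1 : Nat) : Int) (arr.length : Int) = ((j + 1 : Nat) : Int) by
            rw [PySem.Int.mod_eq_emod_of_pos hnpos, Int.emod_eq_of_lt (by omega) (by omega)],
          PySem.List.pyGetD_natCast]
        exact hdec j (by omega) le_rfl
    rw [if_pos (by
      constructor
      · rw [show PySem.List.pyGetD arr ((j : Nat) : Int) 0 = arr.getD j 0 from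
          PySem.List.pyGetD_natCast arr j 0]
        exact hpre
      · rw [show PySem.List.pyGetD arr ((j : Nat) : Int) 0 = arr.getD j 0 from
          PySem.List.pyGetD_natCast arr j 0]
        exact hnxt)]
    exact PySem.List.pyGetD_natCast arr j 0
termination_by ((arr.length : Int) - j).toNat
decreasing_by omega

-- on a valley array the loop keeps moving right once the midpoint is at or past the valley,
-- until it fires the wraparound peak test at the last index
lemma findBiotonicLoopW_eq_last (arr : List Int) (k : Nat) (h2 : 2 ≤ arr.length)
    (hdec : ∀ i, i < k → arr.getD (i + 1) 0 < arr.getD i 0)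
    (hinc : ∀ i, i < arr.length - 1 → k ≤ i → arr.getD i 0 < arr.getD (i + 1) 0)
    (hwrap : arr.getD 0 0 < arr.getD (arr.length - 1) 0)
    (start : Int) (h0 : 0 ≤ start) (hs : start ≤ (arr.length : Int) - 1)
    (hkm : (k : Int) ≤ start + ((arr.length : Int) - 1 - start) / 2) :
    findBiotonicLoop arr (arr.length : Int) start ((arr.length : Int) - 1)
      = arr.getD (arr.length - 1) 0 := by
  have hnpos : (0:Int) < (arr.length : Int) := by omega
  have hss : start ≤ (arr.length : Int) - 1 := hs
  rw [findBiotonicLoop]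
  simp only [dif_pos hss]
  rw [PySem.Int.floordiv_eq_ediv_of_pos (by norm_num : (0:Int) < 2)]
  set m : Int := start + ((arr.length : Int) - 1 - start) / 2 with hm
  have hstartm : start ≤ m := by omega
  have hmstop : m ≤ (arr.length : Int) - 1 := by omega
  have hm0 : 0 ≤ m := le_trans h0 hstartm
  set km : Nat := m.toNat with hkmdef
  have hmk : (km : Int) = m := Int.toNat_of_nonneg hm0
  have hkmlen : km < arr.length := by omega
  have hkkm : k ≤ km := by omega
  rcases Nat.lt_or_ge km (arr.length - 1) with hc | hc
  · -- km < length - 1 : the array rises at mid, search the right half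
    have hnxt : PySem.Int.mod (m + 1) (arr.length : Int) = ((km + 1 : Nat) : Int) := by
      rw [PySem.Int.mod_eq_emod_of_pos hnpos, Int.emod_eq_of_lt (by omega) (by omega)]
      push_cast; omega
    rw [hnxt, ← hmk]
    simp only [PySem.List.pyGetD_natCast]
    have hv : arr.getD km 0 < arr.getD (km + 1) 0 := hinc km hc hkkm
    rw [if_neg (by intro hcond; omega), if_pos hv]
    exact findBiotonicLoopW_eq_last arr k h2 hdec hinc hwrap ((km : Int) + 1)
      (by omega) (by omega) (by omega)
  · -- km = length - 1 : the wraparound peak test fires and returns the last element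
    have hceq : km = arr.length - 1 := by omega
    have hmeq : m = (arr.length : Int) - 1 := by omega
    have hnxti : PySem.Int.mod (m + 1) (arr.length : Int) = ((0 : Nat) : Int) := by
      rw [show m + 1 = (arr.length : Int) by omega,
        PySem.Int.mod_eq_emod_of_pos hnpos, Int.emod_self]
      exact Nat.cast_zero.symm
    have hprei : PySem.Int.mod (m + (arr.length : Int) - 1) (arr.length : Int)
        = ((arr.length - 2 : Nat) : Int) := by
      rw [PySem.Int.mod_eq_emod_of_pos hnpos,
        show m + (arr.length : Int) - 1 = (m - 1) + (arr.length : Int) by ring,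
        Int.add_emod_right, Int.emod_eq_of_lt (by omega) (by omega)]
      omega
    have hk2 : k ≤ arr.length - 2 := by
      rcases Nat.lt_or_ge k (arr.length - 1) with h | h
      · omega
      · exfalso
        have : arr.getD (arr.length - 1) 0 < arr.getD 0 0 :=
          getD_lt_chain_dec arr 0 k (fun i _ hik => hdec i hik) 0 (arr.length - 1) le_rfl (by omega) (by omega)
        omega
    have hc1 : arr.getD (arr.length - 2) 0 < arr.getD km 0 := by
      have := hinc (arr.length - 2) (by omega) (by omega)
      rwa [show arr.length - 2 + 1 = arr.length - 1 by omega, ← hceq] at this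
    have hc2 : arr.getD km 0 > arr.getD 0 0 := by rw [hceq]; omega
    rw [hprei, hnxti, ← hmk]
    simp only [PySem.List.pyGetD_natCast]
    rw [if_pos ⟨hc1, hc2⟩, hceq]
termination_by ((arr.length : Int) - start).toNat
decreasing_by omega

-- B's scan on a valley array fails the peak test at every index before the last and fires there
lemma scanPeakLoopW_eq_last (arr : List Int) (k : Nat) (h2 : 2 ≤ arr.length)
    (hklt : k < arr.length) (hk2 : 2 * k ≤ arr.length - 1)
    (hdec : ∀ i, i < k → arr.getD (i + 1) 0 < arr.getD i 0)
    (hinc : ∀ i, i < arr.length - 1 → k ≤ i → arr.getD i 0 < arr.getD (i + 1) 0)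
    (hwrap : arr.getD 0 0 < arr.getD (arr.length - 1) 0)
    (j : Nat) (hj : j ≤ arr.length - 1) :
    scanPeakLoop arr (arr.length : Int) (j : Int) = arr.getD (arr.length - 1) 0 := by
  have hnpos : (0:Int) < (arr.length : Int) := by omega
  have hne : arr ≠ [] := by intro h; rw [h] at h2; simp at h2
  have hklast : k ≤ arr.length - 2 := by omega
  rw [scanPeakLoop]
  simp only [dif_pos (by omega : (j : Int) < (arr.length : Int))]
  rcases Nat.lt_or_ge j (arr.length - 1) with hc | hc
  · -- j < length - 1 : the test fails, move right
    rw [if_neg (by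
      rcases Nat.eq_zero_or_pos j with h0 | h0
      · -- j = 0 : arr[-1] = last ≥ arr[0]
        subst h0
        intro hcond
        rw [show ((0 : Nat) : Int) - 1 = (-1 : Int) by omega,
          PySem.List.pyGetD_neg_one arr 0 hne, List.getLast_eq_getElem,
          show PySem.List.pyGetD arr ((0 : Nat) : Int) 0 = arr.getD 0 0 from
            PySem.List.pyGetD_natCast arr 0 0] at hcond
        have := hcond.1
        rw [← List.getD_eq_getElem arr 0 (by omega : arr.length - 1 < arr.length)] at this
        omega
      · rcases Nat.lt_or_ge j k with hjk | hjk
        · -- 1 ≤ j < k : decreasing, arr[j-1] < arr[j] fails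
          intro hcond
          rw [show (j : Int) - 1 = ((j - 1 : Nat) : Int) by omega] at hcond
          simp only [PySem.List.pyGetD_natCast] at hcond
          have := hdec (j - 1) (by omega)
          rw [Nat.sub_add_cancel (by omega)] at this
          have := hcond.1
          omega
        · -- k ≤ j < length - 1 : increasing, arr[j] > arr[j+1] fails
          intro hcond
          have hnxti : PySem.Int.mod ((j : Int) + 1) (arr.length : Int)
              = ((j + 1 : Nat) : Int) := by
            rw [PySem.Int.mod_eq_emod_of_pos hnpos, Int.emod_eq_of_lt (by omega) (by omega)]
            push_cast; omega
          rw [hnxti] at hcond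
          simp only [PySem.List.pyGetD_natCast] at hcond
          have := hinc j hc hjk
          have := hcond.2
          omega)]
    rw [show ((j : Nat) : Int) + 1 = ((j + 1 : Nat) : Int) by push_cast; omega]
    exact scanPeakLoopW_eq_last arr k h2 hklt hk2 hdec hinc hwrap (j + 1) (by omega)
  · -- j = length - 1 : the wraparound peak test fires
    have hjeq : j = arr.length - 1 := by omega
    subst hjeq
    have hpre : PySem.List.pyGetD arr (((arr.length - 1 : Nat) : Int) - 1) 0
        < arr.getD (arr.length - 1) 0 := by
      rw [show ((arr.length - 1 : Nat) : Int) - 1 = ((arr.length - 2 : Nat) : Int) by omega,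
        PySem.List.pyGetD_natCast]
      have := hinc (arr.length - 2) (by omega) (by omega)
      rwa [show arr.length - 2 + 1 = arr.length - 1 by omega] at this
    have hnxt : arr.getD (arr.length - 1) 0 >
        PySem.List.pyGetD arr
          (PySem.Int.mod (((arr.length - 1 : Nat) : Int) + 1) (arr.length : Int)) 0 := by
      rw [show ((arr.length - 1 : Nat) : Int) + 1 = (arr.length : Int) by omega,
        PySem.Int.mod_eq_emod_of_pos hnpos, Int.emod_self,
        show (0 : Int) = ((0 : Nat) : Int) from rfl, PySem.List.pyGetD_natCast]
      exact hwrap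
    rw [if_pos (by
      constructor
      · rw [show PySem.List.pyGetD arr ((arr.length - 1 : Nat) : Int) 0
            = arr.getD (arr.length - 1) 0 from PySem.List.pyGetD_natCast arr _ 0]
        exact hpre
      · rw [show PySem.List.pyGetD arr ((arr.length - 1 : Nat) : Int) 0
            = arr.getD (arr.length - 1) 0 from PySem.List.pyGetD_natCast arr _ 0]
        exact hnxt)]
    exact PySem.List.pyGetD_natCast arr _ 0
termination_by ((arr.length : Int) - j).toNat
decreasing_by omega

-- on a non-increasing array (strict first step and wraparound) the loop keeps moving left
-- until the wraparound peak test fires at index 0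
lemma findBiotonicLoopD_eq_first (arr : List Int) (h2 : 2 ≤ arr.length)
    (hni : ∀ i, i < arr.length - 1 → arr.getD (i + 1) 0 ≤ arr.getD i 0)
    (h01 : arr.getD 1 0 < arr.getD 0 0)
    (hw : arr.getD (arr.length - 1) 0 < arr.getD 0 0)
    (stop : Int) (h0 : 0 ≤ stop) (hstop : stop ≤ (arr.length : Int) - 1) :
    findBiotonicLoop arr (arr.length : Int) 0 stop = arr.getD 0 0 := by
  have hnpos : (0:Int) < (arr.length : Int) := by omega
  rw [findBiotonicLoop]
  simp only [dif_pos h0]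
  rw [PySem.Int.floordiv_eq_ediv_of_pos (by norm_num : (0:Int) < 2)]
  set m : Int := 0 + (stop - 0) / 2 with hm
  have hm0 : 0 ≤ m := by omega
  have hmstop : m ≤ stop := by omega
  set km : Nat := m.toNat with hkmdef
  have hmk : (km : Int) = m := Int.toNat_of_nonneg hm0
  rcases Nat.eq_zero_or_pos km with hc | hc
  · -- mid = 0 : the wraparound peak test fires and returns the first element
    have hmz : m = 0 := by omega
    have hprei : PySem.Int.mod (m + (arr.length : Int) - 1) (arr.length : Int)
        = ((arr.length - 1 : Nat) : Int) := by
      rw [hmz, PySem.Int.mod_eq_emod_of_pos hnpos,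
        Int.emod_eq_of_lt (by omega) (by omega)]
      omega
    have hnxti : PySem.Int.mod (m + 1) (arr.length : Int) = ((1 : Nat) : Int) := by
      rw [PySem.Int.mod_eq_emod_of_pos hnpos, Int.emod_eq_of_lt (by omega) (by omega)]
      omega
    rw [hprei, hnxti, show m = ((0 : Nat) : Int) by omega]
    simp only [PySem.List.pyGetD_natCast]
    rw [if_pos ⟨hw, h01⟩]
  · -- mid ≥ 1 : both comparisons fail on a non-increasing array, search the left half
    have hmL : km ≤ arr.length - 2 := by omega
    have hprei : PySem.Int.mod (m + (arr.length : Int) - 1) (arr.length : Int)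
        = ((km - 1 : Nat) : Int) := by
      rw [PySem.Int.mod_eq_emod_of_pos hnpos,
        show m + (arr.length : Int) - 1 = (m - 1) + (arr.length : Int) by ring,
        Int.add_emod_right, Int.emod_eq_of_lt (by omega) (by omega)]
      omega
    have hnxti : PySem.Int.mod (m + 1) (arr.length : Int) = ((km + 1 : Nat) : Int) := by
      rw [PySem.Int.mod_eq_emod_of_pos hnpos, Int.emod_eq_of_lt (by omega) (by omega)]
      push_cast; omega
    have hp : arr.getD km 0 ≤ arr.getD (km - 1) 0 := by
      have := hni (km - 1) (by omega)
      rwa [Nat.sub_add_cancel (by omega)] at this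
    have hq : arr.getD (km + 1) 0 ≤ arr.getD km 0 := hni km (by omega)
    rw [hprei, hnxti, ← hmk]
    simp only [PySem.List.pyGetD_natCast]
    rw [if_neg (by intro hcond; omega), if_neg (by omega)]
    exact findBiotonicLoopD_eq_first arr h2 hni h01 hw ((km : Int) - 1) (by omega) (by omega)
termination_by stop.toNat
decreasing_by omega

-- B's scan fires immediately at index 0 on a non-increasing array with strict first and
-- wraparound steps
lemma scanPeakLoopD_eq_first (arr : List Int) (h2 : 2 ≤ arr.length)
    (h01 : arr.getD 1 0 < arr.getD 0 0)
    (hw : arr.getD (arr.length - 1) 0 < arr.getD 0 0) :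
    scanPeakLoop arr (arr.length : Int) 0 = arr.getD 0 0 := by
  have hnpos : (0:Int) < (arr.length : Int) := by omega
  have hne : arr ≠ [] := by intro h; rw [h] at h2; simp at h2
  rw [scanPeakLoop]
  simp only [dif_pos (by omega : (0 : Int) < (arr.length : Int))]
  have hnxti : PySem.Int.mod ((0 : Int) + 1) (arr.length : Int) = ((1 : Nat) : Int) := by
    rw [PySem.Int.mod_eq_emod_of_pos hnpos, Int.emod_eq_of_lt (by omega) (by omega)]
    omega
  rw [if_pos (by
    constructor
    · rw [show (0 : Int) - 1 = (-1 : Int) by omega,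
        PySem.List.pyGetD_neg_one arr 0 hne, List.getLast_eq_getElem,
        show PySem.List.pyGetD arr (0 : Int) 0 = arr.getD 0 0 by
          rw [show (0 : Int) = ((0 : Nat) : Int) from rfl]
          exact PySem.List.pyGetD_natCast arr 0 0]
      rw [← List.getD_eq_getElem arr 0 (by omega : arr.length - 1 < arr.length)]
      omega
    · rw [hnxti,
        show PySem.List.pyGetD arr (0 : Int) 0 = arr.getD 0 0 by
          rw [show (0 : Int) = ((0 : Nat) : Int) from rfl]
          exact PySem.List.pyGetD_natCast arr 0 0,
        PySem.List.pyGetD_natCast]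
      omega)]
  rw [show (0 : Int) = ((0 : Nat) : Int) from rfl]
  exact PySem.List.pyGetD_natCast arr 0 0

-- ===== VERDICT (by name: the statement is the Claim_ definition above) =====
theorem findBiotonic_point_spec : Claim_equal_findBiotonic_point := by
  intro arr _ hpre
  obtain ⟨h2, hcase⟩ := hpre
  unfold Spec_findBiotonic_point findBiotonic_point findBiotonic_point_alt
  simp only [PySem.List.len_eq]
  rcases hcase with ⟨k, hk, hinc, hdec⟩ | ⟨k, hk, h2k, hdec, hinc, hwrap⟩ | ⟨hni, h01, hw⟩
  · rw [findBiotonicLoop_eq_peak arr k hk h2 hinc hdec 0 ((arr.length : Int) - 1)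
      le_rfl le_rfl (by exact_mod_cast Int.natCast_nonneg k) (by omega)]
    rw [show (0 : Int) = ((0 : Nat) : Int) from rfl,
      scanPeakLoop_eq_peak arr k hk h2 hinc hdec 0 (by omega)]
    norm_num
  · rw [findBiotonicLoopW_eq_last arr k h2 hdec hinc hwrap 0 le_rfl (by omega) (by omega)]
    rw [show (0 : Int) = ((0 : Nat) : Int) from rfl,
      scanPeakLoopW_eq_last arr k h2 hk h2k hdec hinc hwrap 0 (by omega)]
    norm_num
  · rw [findBiotonicLoopD_eq_first arr h2 hni h01 hw ((arr.length : Int) - 1) (by omega) le_rfl]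
    rw [scanPeakLoopD_eq_first arr h2 h01 hw]
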